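-- pv_equiv track=rewrite | github.com/schebachlab/PRF-Search | gene_ontology_enrichment_scheme_final.py | get_go_counts
-- ===== SOURCE A (Python) =====
-- def get_go_counts(study_set, background_set, go_term_dict):
--     """
--     Get counts for GO term enrichment analysis for Fisher's Exact Test.
--     """
--     # GO term counts
--     go_term_counts = {}
--
--     # Iterate over background to count GO terms
--     for uniprot_id in background_set:
--         if uniprot_id in go_term_dict:
--             for go_term in go_term_dict[uniprot_id][1]:  # Access GO term IDs from the dictionary
--                 if go_term not in go_term_counts:
--                     go_term_counts[go_term] = {'a': 0, 'b': 0, 'c': 0, 'd': 0}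
--                 if uniprot_id in study_set:
--                     go_term_counts[go_term]['a'] += 1  # Study set with GO term
--                 else:
--                     go_term_counts[go_term]['b'] += 1  # Background with GO term
--
--     # Calculate c and d
--     for go_term, counts in go_term_counts.items():
--         counts['c'] = len(study_set) - counts['a']  # Study set without GO term
--         counts['d'] = len(background_set) - len(study_set) - counts['b']  # Background without GO term
--
--     return go_term_counts
-- ===== SOURCE B (Python) =====
-- def get_go_counts(study_set, background_set, go_term_dict):
--     """
--     Get counts for GO term enrichment analysis for Fisher's Exact Test.
--     Strategy: materialise the flat annotation list of (go_term, protein_in_study)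
--     pairs, then for each distinct GO term (first-occurrence order) count its
--     occurrences directly in that list -- no running counter state at all.
--     """
--     study = set(study_set)
--     annots = [(go_term, uniprot_id in study)
--               for uniprot_id in background_set if uniprot_id in go_term_dict
--               for go_term in go_term_dict[uniprot_id][1]]
--     order = dict.fromkeys(t for t, _ in annots)
--     n_study = len(study_set)
--     n_back = len(background_set)
--     result = {}
--     for t in order:
--         a = sum(1 for u, f in annots if u == t and f)
--         total = sum(1 for u, _ in annots if u == t)
--         result[t] = {'a': a, 'b': total - a,
--                      'c': n_study - a, 'd': n_back - n_study - (total - a)}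
--     return result
-- ===== Notes on version B (the rewrite author's own statement) =====
-- stated objective: alternative
-- what changed: Instead of streaming per-term counter state in a nested dict while walking the background, B materialises the flat list of (GO term, in-study) annotation pairs, takes the distinct terms in first-occurrence order, and for each term counts its occurrences directly in that list to assemble a, b, c, d arithmetically.
import Mathlib
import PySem

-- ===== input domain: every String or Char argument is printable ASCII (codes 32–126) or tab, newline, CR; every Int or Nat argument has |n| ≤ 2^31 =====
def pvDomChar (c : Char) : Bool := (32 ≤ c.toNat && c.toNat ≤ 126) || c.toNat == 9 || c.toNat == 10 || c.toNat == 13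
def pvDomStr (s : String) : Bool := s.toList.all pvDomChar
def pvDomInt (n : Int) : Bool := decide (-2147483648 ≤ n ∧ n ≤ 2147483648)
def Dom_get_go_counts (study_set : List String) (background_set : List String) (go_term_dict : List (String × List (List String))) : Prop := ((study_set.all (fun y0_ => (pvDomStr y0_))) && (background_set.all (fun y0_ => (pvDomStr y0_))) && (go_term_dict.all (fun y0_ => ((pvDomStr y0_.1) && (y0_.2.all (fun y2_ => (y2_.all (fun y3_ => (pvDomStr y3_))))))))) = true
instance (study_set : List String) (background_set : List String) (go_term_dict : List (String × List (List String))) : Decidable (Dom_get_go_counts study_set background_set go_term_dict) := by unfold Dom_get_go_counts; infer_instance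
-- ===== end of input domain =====

-- B replaces A's streaming nested counter dict by a materialised flat list of
-- (GO term, in-study) annotation pairs plus direct per-term counting over that list
-- (objective: alternative decomposition; not faster).


-- ===== PORT A =====
-- Python A: one pass over background_set accumulating the nested dict
-- go_term_counts[t] = {'a','b','c','d'} (insert-if-absent, then bump 'a' or 'b'),
-- then a second pass setting 'c' and 'd' on every inner dict; the returned dict is
-- rendered as its items list (inner dicts as their items lists).
-- `go_term_dict[uniprot_id][1]` is ported with pyGet?; under Pre_ it is always `some`
-- (the `.getD []` branch is never taken on admitted inputs).
def get_go_counts (study_set : List String) (background_set : List String) (go_term_dict : List (String × List (List String))) : List (String × List (String × Int)) :=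
  let gd : PySem.Dict String (List (List String)) := PySem.Dict.mk go_term_dict
  let counts : PySem.Dict String (PySem.Dict String Int) :=
    background_set.foldl (fun counts pid =>
      match gd.get? pid with
      | none => counts
      | some entry =>
        ((PySem.List.pyGet? entry 1).getD []).foldl (fun counts t =>
          let counts := if counts.contains t then counts
            else counts.insert t (PySem.Dict.mk [("a", (0 : Int)), ("b", 0), ("c", 0), ("d", 0)])
          if study_set.contains pid then
            counts.modify t PySem.Dict.empty (fun inner => inner.modify "a" 0 (· + 1))
          else
            counts.modify t PySem.Dict.empty (fun inner => inner.modify "b" 0 (· + 1))) counts)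
      PySem.Dict.empty
  counts.items.map (fun q =>
    (q.1, ((q.2.insert "c" ((study_set.length : Int) - q.2.getD "a" 0)).insert "d"
            ((background_set.length : Int) - (study_set.length : Int) - q.2.getD "b" 0)).items))

-- ===== PORT B =====
-- Python B: build the flat annotation list of (go_term, in-study) pairs, dedupe the
-- terms by first occurrence (dict.fromkeys → PySem.List.dedup), then count each
-- term's occurrences directly in the flat list (sum(1 for …) → countP).
def get_go_counts_alt (study_set : List String) (background_set : List String) (go_term_dict : List (String × List (List String))) : List (String × List (String × Int)) :=
  let gd : PySem.Dict String (List (List String)) := PySem.Dict.mk go_term_dict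
  let study : PySem.Set String := PySem.Set.ofList study_set
  let annots : List (String × Bool) :=
    background_set.flatMap (fun pid =>
      match gd.get? pid with
      | none => []
      | some entry =>
        ((PySem.List.pyGet? entry 1).getD []).map (fun t => (t, PySem.Set.contains study pid)))
  let order : List String := PySem.List.dedup (annots.map Prod.fst)
  let nStudy : Int := study_set.length
  let nBack : Int := background_set.length
  order.map (fun t =>
    let a : Int := annots.countP (fun q => q.1 == t && q.2)
    let total : Int := annots.countP (fun q => q.1 == t)
    (t, [("a", a), ("b", total - a), ("c", nStudy - a), ("d", nBack - nStudy - (total - a))]))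

-- ===== PRECONDITION & SPEC =====
-- Pre_ excludes exactly the inputs where Python A raises IndexError: a background id whose
-- go_term_dict entry (first match) has fewer than 2 elements, so `go_term_dict[uniprot_id][1]` fails.
def Pre_get_go_counts (study_set : List String) (background_set : List String) (go_term_dict : List (String × List (List String))) : Prop :=
  (background_set.all (fun pid =>
    match (PySem.Dict.mk go_term_dict).get? pid with
    | none => true
    | some entry => decide (2 ≤ entry.length))) = true
instance (study_set : List String) (background_set : List String) (go_term_dict : List (String × List (List String))) : Decidable (Pre_get_go_counts study_set background_set go_term_dict) := by unfold Pre_get_go_counts; infer_instance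
def pvWitness_get_go_counts : List String × List String × (List (String × List (List String))) :=
  (["P1"], ["P1", "P2"], [("P1", [["name"], ["GO:1", "GO:2"]])])

def Spec_get_go_counts (study_set : List String) (background_set : List String) (go_term_dict : List (String × List (List String))) (out : List (String × List (String × Int))) : Prop := out = get_go_counts_alt study_set background_set go_term_dict
instance (study_set : List String) (background_set : List String) (go_term_dict : List (String × List (List String))) (out : List (String × List (String × Int))) : Decidable (Spec_get_go_counts study_set background_set go_term_dict out) := by unfold Spec_get_go_counts; infer_instance

-- ===== CLAIM (what is proved, stated in full; the proofs are below) =====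
def Claim_equal_get_go_counts : Prop := ∀ (study_set : List String) (background_set : List String) (go_term_dict : List (String × List (List String))), Dom_get_go_counts study_set background_set go_term_dict → Pre_get_go_counts study_set background_set go_term_dict → Spec_get_go_counts study_set background_set go_term_dict (get_go_counts study_set background_set go_term_dict)

-- ===== LEMMAS AND PROOFS =====

-- A's per-GO-term step (flag = "uniprot_id in study_set"): insert-if-absent then bump 'a' or 'b'.
def pvStepA (flag : Bool) (d : PySem.Dict String (PySem.Dict String Int)) (t : String) : PySem.Dict String (PySem.Dict String Int) :=
  let d := if d.contains t then d
    else d.insert t (PySem.Dict.mk [("a", (0 : Int)), ("b", 0), ("c", 0), ("d", 0)])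
  if flag then d.modify t PySem.Dict.empty (fun inner => inner.modify "a" 0 (· + 1))
  else d.modify t PySem.Dict.empty (fun inner => inner.modify "b" 0 (· + 1))

-- counts of one term in an annotation list
def pvTot (ann : List (String × Bool)) (t : String) : Int := ann.countP (fun q => q.1 == t)
def pvA (ann : List (String × Bool)) (t : String) : Int := ann.countP (fun q => q.1 == t && q.2)

-- The inner dict A keeps for a term with total count `tot` and study count `a`.
def pvRow (tot a : Int) : PySem.Dict String Int :=
  PySem.Dict.mk [("a", a), ("b", tot - a), ("c", 0), ("d", 0)]

-- Loop invariant: A's nested dict is, row by row, determined by the flat annotation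
-- list processed so far.
def pvInv (d : PySem.Dict String (PySem.Dict String Int)) (ann : List (String × Bool)) : Prop :=
  d.keys.Nodup ∧
  d.items = (PySem.Set.ofList (ann.map Prod.fst)).map (fun t => (t, pvRow (pvTot ann t) (pvA ann t)))

theorem pvTot_append (ann : List (String × Bool)) (t u : String) (flag : Bool) :
    pvTot (ann ++ [(t, flag)]) u = pvTot ann u + (if t = u then 1 else 0) := by
  unfold pvTot
  rw [List.countP_append]
  by_cases h : t = u
  · subst h; simp
  · simp [h]

theorem pvA_append (ann : List (String × Bool)) (t u : String) (flag : Bool) :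
    pvA (ann ++ [(t, flag)]) u = pvA ann u + (if t = u ∧ flag then 1 else 0) := by
  unfold pvA
  rw [List.countP_append]
  by_cases h : t = u
  · subst h; cases flag <;> simp
  · cases flag <;> simp [h]

theorem pvOfList_append (l : List String) (t : String) :
    PySem.Set.ofList (l ++ [t]) = if t ∈ l then PySem.Set.ofList l else PySem.Set.ofList l ++ [t] := by
  rw [PySem.Set.ofList_eq_foldl, List.foldl_append, ← PySem.Set.ofList_eq_foldl]
  simp only [List.foldl_cons, List.foldl_nil]
  show PySem.Set.add (PySem.Set.ofList l) t = _
  by_cases h : t ∈ l <;> simp [PySem.Set.add, h]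

theorem pvInv_step (flag : Bool) (d : PySem.Dict String (PySem.Dict String Int)) (ann : List (String × Bool)) (t : String) (h : pvInv d ann) :
    pvInv (pvStepA flag d t) (ann ++ [(t, flag)]) := by
  obtain ⟨hnd, hitems⟩ := h
  have hkeys : d.keys = PySem.Set.ofList (ann.map Prod.fst) := by
    simp only [PySem.Dict.keys, hitems, List.map_map]
    simp [Function.comp_def]
  have hcont : d.contains t = decide (t ∈ ann.map Prod.fst) := by
    rw [PySem.Dict.contains_eq_decide_mem_keys, hkeys]
    simp [PySem.Set.mem_ofList]
  have hmapfst : (ann ++ [(t, flag)]).map Prod.fst = ann.map Prod.fst ++ [t] := by simp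
  by_cases hmem : t ∈ ann.map Prod.fst
  · -- existing key
    have hdc : d.contains t = true := by rw [hcont]; simpa using hmem
    have htmemdd : t ∈ PySem.Set.ofList (ann.map Prod.fst) := by
      simp [PySem.Set.mem_ofList, hmem]
    have hrowmem : (t, pvRow (pvTot ann t) (pvA ann t)) ∈ d.items := by
      rw [hitems]; exact List.mem_map_of_mem htmemdd
    have hdget : d.getD t PySem.Dict.empty = pvRow (pvTot ann t) (pvA ann t) :=
      PySem.Dict.getD_of_mem_items d hrowmem hnd PySem.Dict.empty
    have hrowA : (pvRow (pvTot ann t) (pvA ann t)).modify "a" 0 (· + 1)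
        = pvRow (pvTot ann t + 1) (pvA ann t + 1) := by
      have h0 : (pvRow (pvTot ann t) (pvA ann t)).modify "a" 0 (· + 1)
          = PySem.Dict.mk [("a", pvA ann t + 1), ("b", pvTot ann t - pvA ann t), ("c", 0), ("d", 0)] := rfl
      rw [h0]
      simp only [pvRow, PySem.Dict.mk.injEq, List.cons.injEq, Prod.mk.injEq, true_and, and_true]
      omega
    have hrowB : (pvRow (pvTot ann t) (pvA ann t)).modify "b" 0 (· + 1)
        = pvRow (pvTot ann t + 1) (pvA ann t) := by
      have h0 : (pvRow (pvTot ann t) (pvA ann t)).modify "b" 0 (· + 1)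
          = PySem.Dict.mk [("a", pvA ann t), ("b", pvTot ann t - pvA ann t + 1), ("c", 0), ("d", 0)] := rfl
      rw [h0]
      simp only [pvRow, PySem.Dict.mk.injEq, List.cons.injEq, Prod.mk.injEq, true_and, and_true]
      omega
    have hA : pvStepA flag d t
        = d.insert t (if flag then pvRow (pvTot ann t + 1) (pvA ann t + 1)
                      else pvRow (pvTot ann t + 1) (pvA ann t)) := by
      cases flag with
      | true =>
        calc pvStepA true d t
            = d.insert t ((d.getD t PySem.Dict.empty).modify "a" 0 (· + 1)) := by
              simp only [pvStepA, hdc, if_true]; rfl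
          _ = _ := by rw [hdget, hrowA]; simp
      | false =>
        calc pvStepA false d t
            = d.insert t ((d.getD t PySem.Dict.empty).modify "b" 0 (· + 1)) := by
              simp only [pvStepA, hdc, if_true, Bool.false_eq_true, if_false]; rfl
          _ = _ := by rw [hdget, hrowB]; simp
    refine ⟨?_, ?_⟩
    · rw [hA, PySem.Dict.keys_insert_of_contains d _ hdc]; exact hnd
    · rw [hA, PySem.Dict.items_insert_of_contains d _ hdc, hitems, List.map_map,
        hmapfst, pvOfList_append, if_pos hmem]
      apply List.map_congr_left
      intro u hu
      by_cases hut : u = t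
      · subst hut
        simp only [Function.comp_apply, beq_self_eq_true, if_true, pvTot_append, pvA_append]
        cases flag <;> simp
      · have hbeq : (u == t) = false := beq_eq_false_iff_ne.mpr hut
        have hne : t ≠ u := fun e => hut e.symm
        simp only [Function.comp_apply, hbeq, Bool.false_eq_true, if_false,
          pvTot_append, pvA_append]
        rw [if_neg hne, if_neg (by simp [hne])]
        simp
  · -- fresh key
    have hdc : d.contains t = false := by rw [hcont]; simpa using hmem
    have htmemdd : t ∉ PySem.Set.ofList (ann.map Prod.fst) := by
      simp [PySem.Set.mem_ofList, hmem]
    have hA : pvStepA flag d t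
        = d.insert t (if flag then pvRow 1 1 else pvRow 1 0) := by
      cases flag <;>
        simp only [pvStepA, hdc, if_false, Bool.false_eq_true, if_true] <;>
        · show (d.insert t _).insert t _ = _
          rw [PySem.Dict.insert_insert_self]
          congr 1
          rw [PySem.Dict.getD_insert_self]
          rfl
    have htot0 : pvTot ann t = 0 := by
      unfold pvTot
      norm_cast
      rw [List.countP_eq_zero]
      intro q hq hbe
      exact hmem ((beq_iff_eq.mp hbe) ▸ List.mem_map_of_mem (f := Prod.fst) hq)
    have ha0 : pvA ann t = 0 := by
      unfold pvA
      norm_cast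
      rw [List.countP_eq_zero]
      intro q hq hbe
      have hq1 : (q.1 == t) = true := ((Bool.and_eq_true _ _).mp hbe).1
      exact hmem ((beq_iff_eq.mp hq1) ▸ List.mem_map_of_mem (f := Prod.fst) hq)
    refine ⟨?_, ?_⟩
    · rw [hA, PySem.Dict.keys_insert_of_not_contains d _ hdc]
      refine List.Nodup.append hnd (List.nodup_singleton t) ?_
      intro a ha hb
      rw [List.mem_singleton] at hb
      subst hb
      exact htmemdd (hkeys ▸ ha)
    · rw [hA, PySem.Dict.items_insert_of_not_contains d _ hdc, hitems,
        hmapfst, pvOfList_append, if_neg hmem, List.map_append]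
      refine congrArg₂ (· ++ ·) (List.map_congr_left ?_) ?_
      · intro u hu
        have hne : t ≠ u := fun e => htmemdd (e ▸ hu)
        rw [pvTot_append, pvA_append, if_neg hne, if_neg (by simp [hne])]
        simp
      · simp only [List.map_cons, List.map_nil, List.cons.injEq, and_true, Prod.mk.injEq, true_and]
        rw [pvTot_append, pvA_append, if_pos rfl, htot0, ha0]
        cases flag <;> simp [pvRow]

-- fold over one protein's term list = appending its annotation pairs
theorem pvInv_inner (flag : Bool) (terms : List String) (d : PySem.Dict String (PySem.Dict String Int)) (ann : List (String × Bool)) (h : pvInv d ann) :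
    pvInv (terms.foldl (pvStepA flag) d) (ann ++ terms.map (fun t => (t, flag))) := by
  induction terms generalizing d ann with
  | nil => simpa using h
  | cons t ts ih =>
    have := ih (pvStepA flag d t) (ann ++ [(t, flag)]) (pvInv_step flag d ann t h)
    simpa [List.append_assoc] using this

theorem pvInv_outer (s : List String) (gd : PySem.Dict String (List (List String))) (bg : List String) (d : PySem.Dict String (PySem.Dict String Int)) (ann : List (String × Bool)) (h : pvInv d ann) :
    pvInv (bg.foldl (fun counts pid =>
            match gd.get? pid with
            | none => counts
            | some entry => ((PySem.List.pyGet? entry 1).getD []).foldl (pvStepA (s.contains pid)) counts) d)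
          (ann ++ bg.flatMap (fun pid =>
            match gd.get? pid with
            | none => []
            | some entry => ((PySem.List.pyGet? entry 1).getD []).map (fun t => (t, s.contains pid)))) := by
  induction bg generalizing d ann with
  | nil => simpa using h
  | cons pid rest ih =>
    simp only [List.foldl_cons, List.flatMap_cons]
    cases hg : gd.get? pid with
    | none => simpa using ih d ann h
    | some entry =>
      have := ih _ _ (pvInv_inner (s.contains pid) ((PySem.List.pyGet? entry 1).getD []) d ann h)
      simpa [List.append_assoc] using this

-- A's final c/d pass on one row, rendered as items
theorem pvFinal (ns nb : Int) (d : PySem.Dict String (PySem.Dict String Int)) (ann : List (String × Bool)) (h : pvInv d ann) :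
    d.items.map (fun q =>
      (q.1, ((q.2.insert "c" (ns - q.2.getD "a" 0)).insert "d" (nb - ns - q.2.getD "b" 0)).items))
    = (PySem.Set.ofList (ann.map Prod.fst)).map (fun t =>
        (t, [("a", pvA ann t), ("b", pvTot ann t - pvA ann t),
             ("c", ns - pvA ann t), ("d", nb - ns - (pvTot ann t - pvA ann t))])) := by
  rw [h.2, List.map_map]
  rfl

theorem pvSet_contains_ofList {α : Type} [BEq α] [LawfulBEq α] (l : List α) (x : α) :
    PySem.Set.contains (PySem.Set.ofList l) x = l.contains x := by
  rw [Bool.eq_iff_iff]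
  simp [PySem.Set.mem_ofList]

-- ===== VERDICT (by name: the statement is the Claim_ definition above) =====
theorem get_go_counts_spec : Claim_equal_get_go_counts := by
  intro s bg g _ _
  unfold Spec_get_go_counts get_go_counts get_go_counts_alt
  simp only [pvSet_contains_ofList, PySem.List.dedup_eq_ofList]
  have hInv := pvInv_outer s (PySem.Dict.mk g) bg PySem.Dict.empty [] ⟨List.nodup_nil, rfl⟩
  rw [List.nil_append] at hInv
  exact pvFinal ((s.length : Int)) ((bg.length : Int)) _ _ hInv
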